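-- pv_equiv track=rewrite | github.com/shivah12/RS-Python-B | Task/Reetika Acharya/q6.py | prime_difference
-- ===== SOURCE A (Python) =====
-- def is_prime(n):
--     if n <= 1:
--         return False
--     for i in range(2, n):
--         if n % i == 0:
--             return False
--     return True
--
-- def prime_difference(N, A):
--     primes = []
--     for i in range(N):
--         if is_prime(A[i]):
--             primes.append(A[i])
--
--     if len(primes) == 0:
--         return 1
--
--     smallest_prime = min(primes)
--     largest_prime = max(primes)
--     return largest_prime - smallest_prime
-- ===== SOURCE B (Python) =====
-- def is_prime(n):
--     if n <= 1:
--         return False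
--     for i in range(2, n):
--         if n % i == 0:
--             return False
--     return True
--
-- def prime_difference(N, A):
--     # single pass: track smallest/largest prime inline instead of building a list
--     found = False
--     smallest = 0
--     largest = 0
--     for i in range(N):
--         v = A[i]
--         if is_prime(v):
--             if not found:
--                 found = True
--                 smallest = v
--                 largest = v
--             else:
--                 if v < smallest:
--                     smallest = v
--                 if v > largest:
--                     largest = v
--     if not found:
--         return 1
--     return largest - smallest
-- ===== Notes on version B (the rewrite author's own statement) =====
-- stated objective: alternative
-- what changed: B replaces A's build-a-list-of-primes plus separate min() and max() scans by one fused traversal that maintains a found flag and running smallest/largest accumulators, returning largest-smallest (or 1 if no prime was seen).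
import Mathlib
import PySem

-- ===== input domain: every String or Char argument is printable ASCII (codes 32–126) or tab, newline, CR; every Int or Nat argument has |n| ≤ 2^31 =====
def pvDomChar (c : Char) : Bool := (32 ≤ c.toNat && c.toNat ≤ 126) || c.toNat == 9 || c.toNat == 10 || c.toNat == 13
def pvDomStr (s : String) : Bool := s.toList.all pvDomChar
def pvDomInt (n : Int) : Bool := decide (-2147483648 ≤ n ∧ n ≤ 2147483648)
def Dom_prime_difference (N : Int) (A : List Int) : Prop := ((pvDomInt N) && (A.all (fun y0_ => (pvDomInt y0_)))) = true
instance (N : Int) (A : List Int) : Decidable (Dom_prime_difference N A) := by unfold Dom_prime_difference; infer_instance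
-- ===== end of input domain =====

-- B fuses A's list-build + min() + max() scans into one traversal with two running accumulators; objective: alternative (same cost, O(1) extra space).

-- ===== PORT A =====
def is_prime (n : Int) : Bool :=
  if n ≤ 1 then false
  else (PySem.List.pyRange 2 n 1).all (fun i => PySem.Int.mod n i != 0)

-- A's loop body: append A[i] to the prime list when prime (A[i] via pyGet?; default 0 unreachable under Pre_)
def pdLoopA (A : List Int) (ps : List Int) (i : Int) : List Int :=
  if is_prime ((PySem.List.pyGet? A i).getD 0) then ps ++ [(PySem.List.pyGet? A i).getD 0] else ps

def prime_difference (N : Int) (A : List Int) : Int :=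
  let primes := (PySem.List.pyRange 0 N 1).foldl (pdLoopA A) []
  if primes.length = 0 then 1
  else ((PySem.List.max? primes (fun x => x)).getD 0) - ((PySem.List.min? primes (fun x => x)).getD 0)

-- ===== PORT B =====
-- B's loop body: state (found, smallest, largest)
def pdLoopB (A : List Int) (st : Bool × Int × Int) (i : Int) : Bool × Int × Int :=
  let v := (PySem.List.pyGet? A i).getD 0
  if is_prime v then
    match st with
    | (false, _, _) => (true, v, v)
    | (true, s, l) => (true, if v < s then v else s, if v > l then v else l)
  else st

def prime_difference_alt (N : Int) (A : List Int) : Int :=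
  let st := (PySem.List.pyRange 0 N 1).foldl (pdLoopB A) (false, 0, 0)
  if st.1 then st.2.2 - st.2.1 else 1

-- ===== PRECONDITION & SPEC =====
-- Pre_ excludes exactly the inputs where Python A raises IndexError (N exceeding len(A)).
def Pre_prime_difference (N : Int) (A : List Int) : Prop := N ≤ (A.length : Int)
instance (N : Int) (A : List Int) : Decidable (Pre_prime_difference N A) := by unfold Pre_prime_difference; infer_instance
def pvWitness_prime_difference : Int × List Int := (3, [2, 3, 10])

def Spec_prime_difference (N : Int) (A : List Int) (out : Int) : Prop := out = prime_difference_alt N A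
instance (N : Int) (A : List Int) (out : Int) : Decidable (Spec_prime_difference N A out) := by unfold Spec_prime_difference; infer_instance

-- ===== CLAIM (what is proved, stated in full; the proofs are below) =====
def Claim_equal_prime_difference : Prop := ∀ (N : Int) (A : List Int), Dom_prime_difference N A → Pre_prime_difference N A → Spec_prime_difference N A (prime_difference N A)

-- ===== LEMMAS AND PROOFS =====

-- summary of A's prime list as B's state
def pdSumm : List Int → Bool × Int × Int
  | [] => (false, 0, 0)
  | x :: t => (true, t.foldl min x, t.foldl max x)

theorem pdStep (A : List Int) (ps : List Int) (i : Int) :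
    pdLoopB A (pdSumm ps) i = pdSumm (pdLoopA A ps i) := by
  unfold pdLoopA pdLoopB
  by_cases h : is_prime ((PySem.List.pyGet? A i).getD 0)
  · cases ps with
    | nil => simp [h, pdSumm]
    | cons x t =>
      simp only [h, if_true, pdSumm, List.cons_append, List.foldl_append,
        List.foldl_cons, List.foldl_nil, Prod.mk.injEq, true_and]
      constructor
      · split_ifs with h1 <;> simp [min_def] <;> omega
      · split_ifs with h1 <;> simp [max_def] <;> omega
  · simp [h]

theorem pdFold (A : List Int) (is : List Int) (ps : List Int) :
    List.foldl (pdLoopB A) (pdSumm ps) is = pdSumm (List.foldl (pdLoopA A) ps is) := by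
  induction is generalizing ps with
  | nil => rfl
  | cons i is ih => simp only [List.foldl_cons, pdStep, ih]

theorem pdFinal (ps : List Int) :
    (if ps.length = 0 then (1 : Int)
     else ((PySem.List.max? ps (fun x => x)).getD 0) - ((PySem.List.min? ps (fun x => x)).getD 0))
    = (if (pdSumm ps).1 then (pdSumm ps).2.2 - (pdSumm ps).2.1 else 1) := by
  cases ps with
  | nil => rfl
  | cons x t =>
    simp [pdSumm, PySem.List.max?_id_cons, PySem.List.min?_id_cons]

-- ===== VERDICT (by name: the statement is the Claim_ definition above) =====
theorem prime_difference_spec : Claim_equal_prime_difference := by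
  intro N A _ _
  unfold Spec_prime_difference prime_difference prime_difference_alt
  rw [show (false, (0:Int), (0:Int)) = pdSumm [] from rfl, pdFold]
  exact pdFinal _
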